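-- pv_equiv track=rewrite | github.com/alertjjm/Python_Practice | ETC/codility/12.py | solution
-- ===== SOURCE A (Python) =====
-- from collections import deque
--
-- def solution(K,A):
--     Aq=deque(A)
--     cnt=0
--     while Aq:
--         left=Aq.popleft()
--         if(left>=K):
--             cnt+=1
--         else:
--             if(len(Aq)==0):
--                 return cnt
--             right=Aq.popleft()
--             newLeft=left+right
--             if(newLeft>=K):
--                 cnt+=1
--             else:
--                 Aq.appendleft(newLeft)
--     return cnt
-- ===== SOURCE B (Python) =====
-- def solution(K, A):
--     cnt = 0
--     acc = 0
--     for x in A: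
--         acc += x
--         if acc >= K:
--             cnt += 1
--             acc = 0
--     return cnt
-- ===== Notes on version B (the rewrite author's own statement) =====
-- stated objective: simpler
-- what changed: Replaced the deque with popleft/appendleft re-insertion control flow by a single straight-line fold keeping one scalar running sum that is reset whenever it reaches K.
import Mathlib
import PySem

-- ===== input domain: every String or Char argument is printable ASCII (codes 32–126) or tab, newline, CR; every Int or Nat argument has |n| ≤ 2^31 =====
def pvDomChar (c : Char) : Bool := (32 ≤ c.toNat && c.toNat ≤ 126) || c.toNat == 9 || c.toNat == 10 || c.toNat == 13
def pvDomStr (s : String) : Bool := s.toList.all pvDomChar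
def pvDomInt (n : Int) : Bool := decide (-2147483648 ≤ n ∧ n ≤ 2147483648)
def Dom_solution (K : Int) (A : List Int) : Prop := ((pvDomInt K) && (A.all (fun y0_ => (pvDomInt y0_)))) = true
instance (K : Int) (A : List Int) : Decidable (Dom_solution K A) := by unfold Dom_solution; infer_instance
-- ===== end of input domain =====

-- B replaces A's deque with popleft/appendleft re-insertion by one scalar-accumulator fold; objective: simpler.

-- ===== PORT A =====
-- the while-loop over the deque: state = remaining deque (a list, popleft = head) and cnt
def solutionLoop (K : Int) : List Int → Int → Int
  | [], cnt => cnt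
  | left :: rest, cnt =>
    if left ≥ K then solutionLoop K rest (cnt + 1)
    else
      match rest with
      | [] => cnt
      | right :: rest' =>
        let newLeft := left + right
        if newLeft ≥ K then solutionLoop K rest' (cnt + 1)
        else solutionLoop K (newLeft :: rest') cnt
  termination_by xs _ => xs.length

def solution (K : Int) (A : List Int) : Int := solutionLoop K A 0

-- ===== PORT B =====
def solution_alt (K : Int) (A : List Int) : Int :=
  (A.foldl (fun (s : Int × Int) x =>
      let acc := s.1 + x
      if acc ≥ K then (0, s.2 + 1) else (acc, s.2)) (0, 0)).2

-- ===== PRECONDITION & SPEC =====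
def Spec_solution (K : Int) (A : List Int) (out : Int) : Prop := out = solution_alt K A
instance (K : Int) (A : List Int) (out : Int) : Decidable (Spec_solution K A out) := by unfold Spec_solution; infer_instance

-- ===== CLAIM (what is proved, stated in full; the proofs are below) =====
def Claim_equal_solution : Prop := ∀ (K : Int) (A : List Int), Dom_solution K A → Spec_solution K A (solution K A)

-- ===== LEMMAS AND PROOFS =====
theorem foldl_eq_loop (K : Int) : ∀ (xs : List Int) (cnt : Int),
    (xs.foldl (fun (s : Int × Int) x =>
      let acc := s.1 + x
      if acc ≥ K then (0, s.2 + 1) else (acc, s.2)) (0, cnt)).2 = solutionLoop K xs cnt := by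
  intro xs cnt
  induction xs, cnt using solutionLoop.induct K with
  | case1 cnt => simp [solutionLoop]
  | case2 left rest cnt h ih =>
    rw [solutionLoop.eq_def]
    simp only [List.foldl, if_pos h, zero_add]
    exact ih
  | case3 left cnt h =>
    rw [solutionLoop.eq_def]
    simp [List.foldl, if_neg h]
  | case4 left cnt h right rest' nl h2 ih =>
    rw [solutionLoop.eq_def]
    rw [show nl = left + right from rfl] at h2
    simp only [List.foldl, zero_add, if_neg h, if_pos h2]
    exact ih
  | case5 left cnt h right rest' nl h2 ih =>
    rw [solutionLoop.eq_def]
    rw [show nl = left + right from rfl] at h2 ih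
    simp only [List.foldl, zero_add, if_neg h, if_neg h2] at ih ⊢
    exact ih

-- ===== VERDICT (by name: the statement is the Claim_ definition above) =====
theorem solution_spec : Claim_equal_solution := by
  intro K A _
  unfold Spec_solution solution solution_alt
  exact (foldl_eq_loop K A 0).symm
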